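-- pv_equiv track=rewrite | github.com/shaun50152/SmartAdvisors | server/app/scripts/recommendation_engine.py | expand_completed_with_prereqs
-- ===== SOURCE A (Python) =====
-- def parse_prereq_string(raw):
--     """
--     Parse a prerequisites/corequisites string into a list of normalized course codes.
--
--     Handles:
--       - '' or None or 'None'          → []
--       - 'EE 2310, PHYS 1444'          → ['EE 2310', 'PHYS 1444']
--       - "['CSE 1310', 'CSE 1320']"    → ['CSE 1310', 'CSE 1320']
--     """
--     if not raw:
--         return []
--     stripped = raw.strip()
--     if stripped.lower() in ('none', '[none]', "['none']", '[]'):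
--         return []
--     # Handle Python list literal format
--     if stripped.startswith('[') and stripped.endswith(']'):
--         inner = stripped[1:-1]
--         codes = [c.strip().strip("'\"") for c in inner.split(',') if c.strip()]
--         codes = [c for c in codes if c.lower() != 'none' and c]
--         return [normalize_code(c) for c in codes]
--     # Plain comma-separated
--     return [normalize_code(p) for p in stripped.split(',') if p.strip()]
--
-- def normalize_code(course_code):
--     return ' '.join(str(course_code).replace('\xa0', ' ').split()).strip()
--
-- COURSE_EQUIVALENCES = {
--     'MATH 3313': 'IE 3301',    # Probability: either satisfies
--     'IE 3301':   'MATH 3313',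
--     'MATH 3330': 'CSE 3380',   # Linear Algebra: either satisfies
--     'CSE 3380':  'MATH 3330',
-- }
--
-- def expand_completed_with_prereqs(normalized_completed, course_map):
--     """
--     Transitively expand the completed set: if you passed a course, you must have
--     satisfied its prerequisites too (directly or transitively).
--
--     Also applies course equivalences (e.g. MATH 3313 <-> IE 3301) so that
--     completing one version of a course satisfies prereqs requiring the other.
--     """
--     expanded = set(normalized_completed)
--     changed = True
--     while changed:
--         changed = False
--         for code in list(expanded):
--             # Transitive prereq expansion
--             course = course_map.get(code)
--             if course:
--                 prereqs = course.get('pre_requisites', '') or ''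
--                 for p in parse_prereq_string(prereqs):
--                     if p not in expanded:
--                         expanded.add(p)
--                         changed = True
--             # Equivalence expansion
--             equiv = COURSE_EQUIVALENCES.get(code)
--             if equiv and equiv not in expanded:
--                 expanded.add(equiv)
--                 changed = True
--     return expanded
-- ===== SOURCE B (Python) =====
-- def parse_prereq_string(raw):
--     if not raw:
--         return []
--     stripped = raw.strip()
--     if stripped.lower() in ('none', '[none]', "['none']", '[]'):
--         return []
--     if stripped.startswith('[') and stripped.endswith(']'):
--         inner = stripped[1:-1]
--         codes = [c.strip().strip("'\"") for c in inner.split(',') if c.strip()]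
--         codes = [c for c in codes if c.lower() != 'none' and c]
--         return [normalize_code(c) for c in codes]
--     return [normalize_code(p) for p in stripped.split(',') if p.strip()]
--
-- def normalize_code(course_code):
--     return ' '.join(str(course_code).replace('\xa0', ' ').split()).strip()
--
-- COURSE_EQUIVALENCES = {
--     'MATH 3313': 'IE 3301',
--     'IE 3301':   'MATH 3313',
--     'MATH 3330': 'CSE 3380',
--     'CSE 3380':  'MATH 3330',
-- }
--
-- def expand_completed_with_prereqs(normalized_completed, course_map):
--     """Precompute every course's parsed prerequisite list once, then run a
--     BFS worklist from the completed courses, visiting each course once."""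
--     adj = {code: parse_prereq_string(course.get('pre_requisites', '') or '')
--            for code, course in course_map.items()}
--     expanded = set()
--     queue = []
--     for c in normalized_completed:
--         if c not in expanded:
--             expanded.add(c)
--             queue.append(c)
--     i = 0
--     while i < len(queue):
--         code = queue[i]
--         i += 1
--         neighbours = adj.get(code, [])
--         if code in COURSE_EQUIVALENCES:
--             neighbours = neighbours + [COURSE_EQUIVALENCES[code]]
--         for p in neighbours:
--             if p not in expanded:
--                 expanded.add(p)
--                 queue.append(p)
--     return expanded
-- ===== Notes on version B (the rewrite author's own statement) =====
-- stated objective: alternative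
-- what changed: Replaced the repeat-until-no-change rescans of the whole completed set (re-parsing every course's prerequisite string on every pass) with a precomputed adjacency dict (each prerequisite string parsed exactly once) plus a BFS worklist that visits each course exactly once.
import Mathlib
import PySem

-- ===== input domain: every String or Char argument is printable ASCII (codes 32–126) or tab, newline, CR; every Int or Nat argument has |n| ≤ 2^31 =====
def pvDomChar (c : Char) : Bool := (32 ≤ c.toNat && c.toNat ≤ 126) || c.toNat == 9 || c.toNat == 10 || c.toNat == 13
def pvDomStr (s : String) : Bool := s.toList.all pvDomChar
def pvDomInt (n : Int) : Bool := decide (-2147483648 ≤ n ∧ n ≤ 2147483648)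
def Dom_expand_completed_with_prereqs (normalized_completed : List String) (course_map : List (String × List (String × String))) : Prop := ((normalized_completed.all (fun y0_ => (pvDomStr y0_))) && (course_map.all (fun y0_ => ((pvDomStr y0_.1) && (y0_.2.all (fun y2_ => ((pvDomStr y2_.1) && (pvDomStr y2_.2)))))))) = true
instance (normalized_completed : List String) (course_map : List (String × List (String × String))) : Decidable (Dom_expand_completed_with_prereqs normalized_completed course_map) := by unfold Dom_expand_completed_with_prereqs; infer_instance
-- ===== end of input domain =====

-- B replaces A's repeat-until-stable rescans of the whole set (re-parsing every prereq string on every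
-- pass) with a precomputed adjacency dict (each prereq string parsed once) and a BFS worklist that
-- processes each course exactly once (objective: alternative).

-- ===== PORT A =====
-- shared module helpers, used verbatim by both Python versions
def normalize_code (course_code : String) : String :=
  PySem.Str.strip (PySem.Str.join " " (PySem.Str.split₀ (PySem.Str.replace course_code "\u00A0" " ")))

def parse_prereq_string (raw : String) : List String :=
  if raw = "" then []
  else
    let stripped := PySem.Str.strip raw
    if PySem.Str.lower stripped ∈ ["none", "[none]", "['none']", "[]"] then []
    else if PySem.Str.startswith stripped "[" && PySem.Str.endswith stripped "]" then
      -- inner.split(','): the separator is nonempty, so split? is always `some` (getD is exact)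
      let inner := PySem.Str.slice stripped (some 1) (some (-1))
      let codes := (((PySem.Str.split? inner ",").getD []).filter
          (fun c => decide (PySem.Str.strip c ≠ ""))).map
          (fun c => PySem.Str.stripChars (PySem.Str.strip c) "'\"")
      let codes := codes.filter (fun c => decide (PySem.Str.lower c ≠ "none" ∧ c ≠ ""))
      codes.map normalize_code
    else
      (((PySem.Str.split? stripped ",").getD []).filter
          (fun p => decide (PySem.Str.strip p ≠ ""))).map normalize_code

def COURSE_EQUIVALENCES : PySem.Dict String String :=
  PySem.Dict.ofList [("MATH 3313", "IE 3301"), ("IE 3301", "MATH 3313"),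
                     ("MATH 3330", "CSE 3380"), ("CSE 3380", "MATH 3330")]

-- proof-side abstractions of one "process this course" step (A's loop body);
-- they and the lemmas about them are needed by the ports' termination proofs, hence placed here
def pvAddAll (S xs : List String) : List String :=
  xs.foldl (fun S p => if p ∈ S then S else S ++ [p]) S

def pvCourseOf (course_map : List (String × List (String × String))) (code : String) :
    List (String × String) :=
  (PySem.Dict.get? (PySem.Dict.ofList course_map) code).getD []

def pvPrereqsOf (course_map : List (String × List (String × String))) (code : String) : List String :=
  if pvCourseOf course_map code = [] then []
  else parse_prereq_string (PySem.Dict.getD (PySem.Dict.ofList (pvCourseOf course_map code)) "pre_requisites" "")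

def pvEquivOf (code : String) : List String :=
  if (PySem.Dict.get? COURSE_EQUIVALENCES code).getD "" = "" then []
  else [(PySem.Dict.get? COURSE_EQUIVALENCES code).getD ""]

def pvNbrs (course_map : List (String × List (String × String))) (code : String) : List String :=
  pvPrereqsOf course_map code ++ pvEquivOf code

def pvProcOne (course_map : List (String × List (String × String))) (S : List String) (code : String) : List String :=
  pvAddAll S (pvNbrs course_map code)

def pvMulti (course_map : List (String × List (String × String))) (S : List String) (q : List String) : List String :=
  q.foldl (pvProcOne course_map) S

-- finite universe every course code added by A lives in (all parses + the equivalence values)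
def pvUList (course_map : List (String × List (String × String))) : List String :=
  course_map.flatMap (fun kv =>
    if kv.2 = [] then []
    else parse_prereq_string (PySem.Dict.getD (PySem.Dict.ofList kv.2) "pre_requisites" "")) ++
  ["IE 3301", "MATH 3313", "CSE 3380", "MATH 3330"]

def pvMeasureU (U S : List String) : Nat := ((U.toFinset) \ S.toFinset).card

-- lemmas cited by the ports' termination proofs
theorem pv_prefix_pvAddAll (xs S : List String) : S <+: pvAddAll S xs := by
  induction xs generalizing S with
  | nil => simp [pvAddAll]
  | cons p xs ih =>
      simp only [pvAddAll, List.foldl_cons]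
      by_cases h : p ∈ S
      · simpa [h, pvAddAll] using ih S
      · exact List.IsPrefix.trans (List.prefix_append S [p]) (by simpa [h, pvAddAll] using ih (S ++ [p]))

theorem pv_pvAddAll_eq_append (xs S : List String) :
    pvAddAll S xs = S ++ (pvAddAll S xs).drop S.length := by
  have h := pv_prefix_pvAddAll xs S
  exact (List.prefix_iff_eq_append.1 h).symm

theorem pv_mem_pvAddAll (x : String) (xs S : List String) (h : x ∈ pvAddAll S xs) : x ∈ S ∨ x ∈ xs := by
  induction xs generalizing S with
  | nil => simpa [pvAddAll] using h
  | cons p xs ih =>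
      simp only [pvAddAll, List.foldl_cons] at h
      by_cases hp : p ∈ S
      · rw [if_pos hp] at h
        rcases ih S (by simpa [pvAddAll] using h) with h' | h'
        · exact Or.inl h'
        · exact Or.inr (List.mem_cons_of_mem _ h')
      · rw [if_neg hp] at h
        rcases ih (S ++ [p]) (by simpa [pvAddAll] using h) with h' | h'
        · rcases List.mem_append.1 h' with h'' | h''
          · exact Or.inl h''
          · simp at h''; subst h''; exact Or.inr (List.mem_cons_self)
        · exact Or.inr (List.mem_cons_of_mem _ h')

theorem pv_drop_pvAddAll_not_mem (xs S : List String) :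
    ∀ x ∈ (pvAddAll S xs).drop S.length, x ∉ S := by
  induction xs generalizing S with
  | nil => simp [pvAddAll]
  | cons p xs ih =>
      intro x hx
      simp only [pvAddAll, List.foldl_cons] at hx
      by_cases hp : p ∈ S
      · rw [if_pos hp] at hx
        exact ih S x hx
      · rw [if_neg hp] at hx
        rw [show List.foldl (fun S p => if p ∈ S then S else S ++ [p]) (S ++ [p]) xs
            = pvAddAll (S ++ [p]) xs from rfl] at hx
        have hT := pv_pvAddAll_eq_append xs (S ++ [p])
        rw [hT, List.append_assoc, List.drop_left] at hx
        rcases List.mem_append.1 hx with h' | h'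
        · simp at h'; subst h'; exact hp
        · intro hxs
          exact ih (S ++ [p]) x h' (List.mem_append.2 (Or.inl hxs))

theorem pv_drop_chain (S T₁ T : List String) (h1 : S <+: T₁) (h2 : T₁ <+: T) :
    T.drop S.length = T₁.drop S.length ++ T.drop T₁.length := by
  rcases h1 with ⟨a, rfl⟩
  rcases h2 with ⟨b, rfl⟩
  simp

theorem pv_prefix_pvMulti (cm : List (String × List (String × String))) (q S : List String) :
    S <+: pvMulti cm S q := by
  induction q generalizing S with
  | nil => simp [pvMulti]
  | cons c q ih =>
      simp only [pvMulti, List.foldl_cons]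
      exact List.IsPrefix.trans (pv_prefix_pvAddAll _ S) (by simpa [pvMulti] using ih (pvProcOne cm S c))

-- membership in the result of a Dict.ofList build comes from the original pair list
theorem pv_mem_items_insert {κ ν : Type} [BEq κ] (d : PySem.Dict κ ν) (k : κ) (v : ν)
    (p : κ × ν) (h : p ∈ (d.insert k v).items) : p ∈ d.items ∨ p = (k, v) := by
  rw [PySem.Dict.items_insert] at h
  by_cases hc : d.contains k = true
  · rw [if_pos hc] at h
    rcases List.mem_map.1 h with ⟨p', hp', hfp⟩
    by_cases hk : (p'.1 == k) = true
    · rw [if_pos hk] at hfp; exact Or.inr hfp.symm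
    · rw [if_neg hk] at hfp; exact Or.inl (hfp ▸ hp')
  · rw [if_neg hc] at h
    rcases List.mem_append.1 h with h' | h'
    · exact Or.inl h'
    · simp at h'; exact Or.inr (by simp [h'])

theorem pv_mem_of_mem_items_ofList {κ ν : Type} [BEq κ] (l : List (κ × ν))
    (p : κ × ν) (h : p ∈ (PySem.Dict.ofList l).items) : p ∈ l := by
  suffices H : ∀ (l : List (κ × ν)) (d : PySem.Dict κ ν),
      p ∈ (l.foldl (fun d kv => d.insert kv.1 kv.2) d).items → p ∈ d.items ∨ p ∈ l by
    rcases H l PySem.Dict.empty (by exact h) with h' | h'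
    · simp [PySem.Dict.empty] at h'
    · exact h'
  intro l
  induction l with
  | nil => intro d h; exact Or.inl h
  | cons kv l ih =>
      intro d h
      rcases ih (d.insert kv.1 kv.2) h with h' | h'
      · rcases pv_mem_items_insert d kv.1 kv.2 p h' with h'' | h''
        · exact Or.inl h''
        · exact Or.inr (by simp [h''])
      · exact Or.inr (List.mem_cons_of_mem _ h')

theorem pv_nbrs_subset_U (cm : List (String × List (String × String))) (c x : String)
    (h : x ∈ pvNbrs cm c) : x ∈ pvUList cm := by
  rcases List.mem_append.1 h with h' | h'
  · unfold pvPrereqsOf at h'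
    unfold pvUList
    refine List.mem_append.2 (Or.inl ?_)
    by_cases hc : pvCourseOf cm c = []
    · rw [if_pos hc] at h'; simp at h'
    · rw [if_neg hc] at h'
      have hm : PySem.Dict.get? (PySem.Dict.ofList cm) c = some (pvCourseOf cm c) := by
        unfold pvCourseOf at hc ⊢
        rcases hg : PySem.Dict.get? (PySem.Dict.ofList cm) c with _ | course
        · rw [hg] at hc; simp at hc
        · simp
      have hmem : (c, pvCourseOf cm c) ∈ cm :=
        pv_mem_of_mem_items_ofList cm _ (PySem.Dict.mem_items_of_get?_eq_some _ hm)
      exact List.mem_flatMap.2 ⟨(c, pvCourseOf cm c), hmem, by simpa [hc] using h'⟩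
  · unfold pvEquivOf at h'
    by_cases h0 : (PySem.Dict.get? COURSE_EQUIVALENCES c).getD "" = ""
    · rw [if_pos h0] at h'; simp at h'
    · rw [if_neg h0] at h'
      simp at h'; subst h'
      have he : PySem.Dict.get? COURSE_EQUIVALENCES c
          = some ((PySem.Dict.get? COURSE_EQUIVALENCES c).getD "") := by
        rcases hg : PySem.Dict.get? COURSE_EQUIVALENCES c with _ | e
        · rw [hg] at h0; simp at h0
        · simp
      have hmem : (c, (PySem.Dict.get? COURSE_EQUIVALENCES c).getD "")
          ∈ [("MATH 3313", "IE 3301"), ("IE 3301", "MATH 3313"),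
             ("MATH 3330", "CSE 3380"), ("CSE 3380", "MATH 3330")] :=
        pv_mem_of_mem_items_ofList _ _ (PySem.Dict.mem_items_of_get?_eq_some _ he)
      unfold pvUList
      refine List.mem_append.2 (Or.inr ?_)
      simp only [List.mem_cons, List.not_mem_nil, or_false, Prod.mk.injEq] at hmem
      rcases hmem with ⟨-, h⟩ | ⟨-, h⟩ | ⟨-, h⟩ | ⟨-, h⟩ <;> rw [h] <;> simp

theorem pv_mem_pvMulti_U (cm : List (String × List (String × String))) (q S : List String)
    (x : String) (h : x ∈ pvMulti cm S q) : x ∈ S ∨ x ∈ pvUList cm := by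
  induction q generalizing S with
  | nil => exact Or.inl (by simpa [pvMulti] using h)
  | cons c q ih =>
      simp only [pvMulti, List.foldl_cons] at h
      rcases ih (pvProcOne cm S c) (by simpa [pvMulti] using h) with h' | h'
      · rcases pv_mem_pvAddAll x _ S h' with h'' | h''
        · exact Or.inl h''
        · exact Or.inr (pv_nbrs_subset_U cm c x h'')
      · exact Or.inr h'

theorem pv_drop_pvMulti_not_mem (cm : List (String × List (String × String))) (q S : List String) :
    ∀ x ∈ (pvMulti cm S q).drop S.length, x ∉ S := by
  induction q generalizing S with
  | nil => simp [pvMulti]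
  | cons c q ih =>
      intro x hx
      simp only [pvMulti, List.foldl_cons] at hx
      have h1 : S <+: pvProcOne cm S c := pv_prefix_pvAddAll _ S
      have h2 : pvProcOne cm S c <+: pvMulti cm (pvProcOne cm S c) q := pv_prefix_pvMulti cm q _
      rw [show List.foldl (pvProcOne cm) (pvProcOne cm S c) q
          = pvMulti cm (pvProcOne cm S c) q from rfl] at hx
      rw [pv_drop_chain S (pvProcOne cm S c) _ h1 h2] at hx
      rcases List.mem_append.1 hx with h' | h'
      · exact pv_drop_pvAddAll_not_mem _ S x h'
      · intro hS
        exact ih (pvProcOne cm S c) x h' (h1.subset hS)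

theorem pv_measure_lt (U S T : List String)
    (hpre : S <+: T) (hne : T ≠ S)
    (hU : ∀ x ∈ T, x ∈ S ∨ x ∈ U)
    (hnew : ∀ x ∈ T.drop S.length, x ∉ S) :
    pvMeasureU U T < pvMeasureU U S := by
  rcases hpre with ⟨a, rfl⟩
  have ha : a ≠ [] := by rintro rfl; simp at hne
  rcases a with _ | ⟨x, a⟩
  · exact absurd rfl ha
  have hxT : x ∈ S ++ x :: a := by simp
  have hxdrop : x ∈ (S ++ x :: a).drop S.length := by rw [List.drop_left]; simp
  have hxS : x ∉ S := hnew x hxdrop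
  have hxU : x ∈ U := by
    rcases hU x hxT with h | h
    · exact absurd h hxS
    · exact h
  apply Finset.card_lt_card
  rw [Finset.ssubset_def]
  constructor
  · intro y hy
    simp only [Finset.mem_sdiff, List.mem_toFinset, List.mem_append] at hy ⊢
    exact ⟨hy.1, fun hyS => hy.2 (Or.inl hyS)⟩
  · intro hcon
    have := hcon (by simp only [Finset.mem_sdiff, List.mem_toFinset]; exact ⟨hxU, hxS⟩ :
      x ∈ U.toFinset \ S.toFinset)
    simp only [Finset.mem_sdiff, List.mem_toFinset] at this
    exact this.2 hxT

theorem pv_chainNe (S T F : List String) (h1 : S <+: T) (h2 : T <+: F) :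
    (decide (T ≠ S) || decide (F ≠ T)) = decide (F ≠ S) := by
  by_cases hTS : T = S
  · subst hTS; simp
  · have hFS : F ≠ S := by
      rintro rfl
      exact hTS (h2.eq_of_length (le_antisymm h2.length_le h1.length_le))
    simp [hTS, hFS]

-- characterization of the fold bodies
theorem pv_foldFlag (xs : List String) : ∀ (S : List String) (b : Bool),
    xs.foldl (fun sc p => if p ∈ sc.1 then sc else (sc.1 ++ [p], true)) (S, b)
      = (pvAddAll S xs, b || decide (pvAddAll S xs ≠ S)) := by
  induction xs with
  | nil => intro S b; simp [pvAddAll]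
  | cons p xs ih =>
      intro S b
      simp only [List.foldl_cons]
      by_cases hp : p ∈ S
      · rw [if_pos hp]
        simpa [pvAddAll, hp] using ih S b
      · rw [if_neg hp]
        rw [ih (S ++ [p]) true]
        have hpre : (S ++ [p]) <+: pvAddAll (S ++ [p]) xs := pv_prefix_pvAddAll xs (S ++ [p])
        have hne : pvAddAll (S ++ [p]) xs ≠ S := by
          intro h
          have := hpre.length_le
          rw [h] at this
          simp at this
        have hstep : pvAddAll S (p :: xs) = pvAddAll (S ++ [p]) xs := by
          simp [pvAddAll, if_neg hp]
        rw [hstep]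
        simp [hne]

theorem pv_foldNew (xs : List String) : ∀ (S n : List String),
    xs.foldl (fun sn p => if p ∈ sn.1 then sn else (sn.1 ++ [p], sn.2 ++ [p])) (S, n)
      = (pvAddAll S xs, n ++ (pvAddAll S xs).drop S.length) := by
  induction xs with
  | nil => intro S n; simp [pvAddAll]
  | cons p xs ih =>
      intro S n
      simp only [List.foldl_cons]
      by_cases hp : p ∈ S
      · rw [if_pos hp]
        simpa [pvAddAll, hp] using ih S n
      · rw [if_neg hp]
        rw [ih (S ++ [p]) (n ++ [p])]
        have hT := pv_pvAddAll_eq_append xs (S ++ [p])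
        have hd : List.drop S.length (pvAddAll (S ++ [p]) xs)
            = [p] ++ List.drop (S ++ [p]).length (pvAddAll (S ++ [p]) xs) := by
          conv_lhs => rw [hT]
          rw [List.append_assoc, List.drop_left]
        simp only [pvAddAll, List.foldl_cons, if_neg hp]
        rw [show List.foldl (fun S p => if p ∈ S then S else S ++ [p]) (S ++ [p]) xs
            = pvAddAll (S ++ [p]) xs from rfl, hd, ← List.append_assoc]

-- ===== A's port proper =====
def procA_pre (course_map : List (String × List (String × String))) (sc : List String × Bool)
    (code : String) : List String × Bool :=
  match PySem.Dict.get? (PySem.Dict.ofList course_map) code with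
  | some course =>
      if course = [] then sc
      else
        -- prereqs = course.get('pre_requisites', '') or ''  ('or' is the identity on strings)
        let prereqs := PySem.Dict.getD (PySem.Dict.ofList course) "pre_requisites" ""
        (parse_prereq_string prereqs).foldl
          (fun sc p => if p ∈ sc.1 then sc else (sc.1 ++ [p], true)) sc
  | none => sc

def procA_equiv (sc1 : List String × Bool) (code : String) : List String × Bool :=
  match PySem.Dict.get? COURSE_EQUIVALENCES code with
  | some equiv => if equiv ≠ "" ∧ equiv ∉ sc1.1 then (sc1.1 ++ [equiv], true) else sc1
  | none => sc1

-- one iteration of A's inner `for code in list(expanded)` body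
def procA (course_map : List (String × List (String × String))) (sc : List String × Bool)
    (code : String) : List String × Bool :=
  procA_equiv (procA_pre course_map sc code) code

def passA (course_map : List (String × List (String × String))) (S : List String) :
    List String × Bool :=
  S.foldl (procA course_map) (S, false)

theorem pv_procA_pre_char (cm : List (String × List (String × String))) (S : List String)
    (b : Bool) (code : String) :
    procA_pre cm (S, b) code
      = (pvAddAll S (pvPrereqsOf cm code), b || decide (pvAddAll S (pvPrereqsOf cm code) ≠ S)) := by
  unfold procA_pre
  split
  · next course heq =>
      have hco : pvCourseOf cm code = course := by simp [pvCourseOf, heq]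
      by_cases hc : course = []
      · rw [if_pos hc]
        simp [pvPrereqsOf, hco, hc, pvAddAll]
      · rw [if_neg hc]
        rw [pv_foldFlag]
        simp [pvPrereqsOf, hco, hc]
  · next heq =>
      have hco : pvCourseOf cm code = [] := by simp [pvCourseOf, heq]
      simp [pvPrereqsOf, hco, pvAddAll]

theorem pv_procA_equiv_char (S : List String) (b : Bool) (code : String) :
    procA_equiv (S, b) code
      = (pvAddAll S (pvEquivOf code), b || decide (pvAddAll S (pvEquivOf code) ≠ S)) := by
  unfold procA_equiv
  split
  · next e heq =>
      by_cases h0 : e = ""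
      · subst h0
        simp [pvEquivOf, heq, pvAddAll]
      · by_cases hmem : e ∈ S
        · rw [if_neg (by simp [hmem])]
          simp [pvEquivOf, heq, h0, pvAddAll, hmem]
        · rw [if_pos ⟨h0, hmem⟩]
          have hne : S ++ [e] ≠ S := by simp
          simp [pvEquivOf, heq, h0, pvAddAll, hmem, hne]
  · next heq =>
      simp [pvEquivOf, heq, pvAddAll]

theorem pv_pvAddAll_append (S xs ys : List String) :
    pvAddAll S (xs ++ ys) = pvAddAll (pvAddAll S xs) ys := by
  simp [pvAddAll, List.foldl_append]

theorem pv_procA_char (cm : List (String × List (String × String))) (S : List String) (b : Bool)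
    (code : String) :
    procA cm (S, b) code = (pvProcOne cm S code, b || decide (pvProcOne cm S code ≠ S)) := by
  unfold procA
  rw [pv_procA_pre_char, pv_procA_equiv_char]
  have hF : pvProcOne cm S code = pvAddAll (pvAddAll S (pvPrereqsOf cm code)) (pvEquivOf code) := by
    rw [show pvProcOne cm S code = pvAddAll S (pvNbrs cm code) from rfl, pvNbrs,
      pv_pvAddAll_append]
  rw [← hF, Bool.or_assoc,
    pv_chainNe S (pvAddAll S (pvPrereqsOf cm code)) (pvProcOne cm S code)
      (pv_prefix_pvAddAll _ S) (hF ▸ pv_prefix_pvAddAll _ _)]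

theorem pv_passA_char (cm : List (String × List (String × String))) (q : List String) :
    ∀ (S : List String) (b : Bool),
      q.foldl (procA cm) (S, b) = (pvMulti cm S q, b || decide (pvMulti cm S q ≠ S)) := by
  induction q with
  | nil => intro S b; simp [pvMulti]
  | cons c q ih =>
      intro S b
      rw [List.foldl_cons, pv_procA_char, ih]
      have h1 : S <+: pvProcOne cm S c := pv_prefix_pvAddAll _ S
      have h2 : pvProcOne cm S c <+: pvMulti cm (pvProcOne cm S c) q := pv_prefix_pvMulti cm q _
      rw [show pvMulti cm S (c :: q) = pvMulti cm (pvProcOne cm S c) q from rfl,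
        Bool.or_assoc, pv_chainNe S (pvProcOne cm S c) (pvMulti cm (pvProcOne cm S c) q) h1 h2]

def aLoop (course_map : List (String × List (String × String))) (S : List String) : List String :=
  if h : (passA course_map S).2 = true then aLoop course_map (passA course_map S).1
  else (passA course_map S).1
termination_by pvMeasureU (pvUList course_map) S
decreasing_by
  rw [passA, pv_passA_char course_map S S false] at h ⊢
  simp only [Bool.false_or, decide_eq_true_eq] at h
  exact pv_measure_lt (pvUList course_map) S _ (pv_prefix_pvMulti course_map S S) h
    (pv_mem_pvMulti_U course_map S S) (pv_drop_pvMulti_not_mem course_map S S)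

def expand_completed_with_prereqs (normalized_completed : List String)
    (course_map : List (String × List (String × String))) : List String :=
  aLoop course_map (PySem.Set.ofList normalized_completed)

-- ===== PORT B =====
-- adj = {code: parse_prereq_string(course.get('pre_requisites','') or '') for code, course in course_map.items()}
-- (a value-mapped rebuild of the same dict: folding inserts over the pair list is exact for every lookup)
def pvAdj (course_map : List (String × List (String × String))) :
    PySem.Dict String (List String) :=
  course_map.foldl
    (fun d kv =>
      d.insert kv.1 (parse_prereq_string (PySem.Dict.getD (PySem.Dict.ofList kv.2) "pre_requisites" "")))
    PySem.Dict.empty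

-- finite universe every code discovered by the BFS lives in
def pvUAdj (adj : PySem.Dict String (List String)) : List String :=
  adj.values.flatten ++ ["IE 3301", "MATH 3313", "CSE 3380", "MATH 3330"]

-- lemma cited by bfsAlt's termination proof: every neighbour lies in the finite universe
theorem pv_nbrsB_subset_U (adj : PySem.Dict String (List String)) (code x : String)
    (h : x ∈ (if PySem.Dict.contains COURSE_EQUIVALENCES code = true
        then PySem.Dict.getD adj code [] ++ [PySem.Dict.getD COURSE_EQUIVALENCES code ""]
        else PySem.Dict.getD adj code [])) : x ∈ pvUAdj adj := by
  have hadj : ∀ y, y ∈ PySem.Dict.getD adj code [] → y ∈ adj.values.flatten := by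
    intro y hy
    rcases hg : PySem.Dict.get? adj code with _ | v
    · rw [PySem.Dict.getD_of_get?_eq_none _ _ hg] at hy; simp at hy
    · rw [PySem.Dict.getD_of_get?_eq_some _ _ hg] at hy
      refine List.mem_flatten.2 ⟨v, ?_, hy⟩
      exact List.mem_map_of_mem (PySem.Dict.mem_items_of_get?_eq_some _ hg)
  by_cases hc : PySem.Dict.contains COURSE_EQUIVALENCES code = true
  · rw [if_pos hc] at h
    rcases List.mem_append.1 h with h' | h'
    · exact List.mem_append.2 (Or.inl (hadj x h'))
    · simp at h'; subst h'
      have hsome : ∃ e, PySem.Dict.get? COURSE_EQUIVALENCES code = some e := by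
        rw [PySem.Dict.contains_eq_isSome_get?] at hc
        exact Option.isSome_iff_exists.1 hc
      rcases hsome with ⟨e, he⟩
      have hmem : (code, e) ∈ [("MATH 3313", "IE 3301"), ("IE 3301", "MATH 3313"),
          ("MATH 3330", "CSE 3380"), ("CSE 3380", "MATH 3330")] :=
        pv_mem_of_mem_items_ofList _ _ (PySem.Dict.mem_items_of_get?_eq_some _ he)
      rw [PySem.Dict.getD_of_get?_eq_some _ _ he]
      refine List.mem_append.2 (Or.inr ?_)
      simp only [List.mem_cons, List.not_mem_nil, or_false, Prod.mk.injEq] at hmem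
      rcases hmem with ⟨-, h⟩ | ⟨-, h⟩ | ⟨-, h⟩ | ⟨-, h⟩ <;> rw [h] <;> simp
  · rw [if_neg hc] at h
    exact List.mem_append.2 (Or.inl (hadj x h))

-- the BFS worklist: dequeue one code, enqueue its not-yet-seen neighbours
def bfsAlt (adj : PySem.Dict String (List String)) (S q : List String) : List String :=
  match q with
  | [] => S
  | code :: rest =>
      let ns := if PySem.Dict.contains COURSE_EQUIVALENCES code = true
        then PySem.Dict.getD adj code [] ++ [PySem.Dict.getD COURSE_EQUIVALENCES code ""]
        else PySem.Dict.getD adj code []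
      let r := ns.foldl (fun sq p => if p ∈ sq.1 then sq else (sq.1 ++ [p], sq.2 ++ [p])) (S, rest)
      bfsAlt adj r.1 r.2
termination_by (pvMeasureU (pvUAdj adj) S, q.length)
decreasing_by
  simp only [dite_eq_ite]
  rw [pv_foldNew]
  by_cases hnil : (pvAddAll S (if PySem.Dict.contains COURSE_EQUIVALENCES code = true
      then PySem.Dict.getD adj code [] ++ [PySem.Dict.getD COURSE_EQUIVALENCES code ""]
      else PySem.Dict.getD adj code [])).drop S.length = []
  · have hTS : pvAddAll S (if PySem.Dict.contains COURSE_EQUIVALENCES code = true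
        then PySem.Dict.getD adj code [] ++ [PySem.Dict.getD COURSE_EQUIVALENCES code ""]
        else PySem.Dict.getD adj code []) = S := by
      conv_lhs => rw [pv_pvAddAll_eq_append]
      rw [hnil, List.append_nil]
    simp only [hTS]
    exact Prod.Lex.right _ (by simp)
  · apply Prod.Lex.left
    have hne : pvAddAll S (if PySem.Dict.contains COURSE_EQUIVALENCES code = true
        then PySem.Dict.getD adj code [] ++ [PySem.Dict.getD COURSE_EQUIVALENCES code ""]
        else PySem.Dict.getD adj code []) ≠ S := by
      intro h
      rw [h, List.drop_length] at hnil
      exact hnil rfl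
    exact pv_measure_lt (pvUAdj adj) S _ (pv_prefix_pvAddAll _ S) hne
      (fun x hx => by
        rcases pv_mem_pvAddAll x _ S hx with h | h
        · exact Or.inl h
        · exact Or.inr (pv_nbrsB_subset_U adj code x h))
      (pv_drop_pvAddAll_not_mem _ S)

def expand_completed_with_prereqs_alt (normalized_completed : List String)
    (course_map : List (String × List (String × String))) : List String :=
  let init := normalized_completed.foldl
    (fun sq c => if c ∈ sq.1 then sq else (sq.1 ++ [c], sq.2 ++ [c]))
    (([] : List String), ([] : List String))
  bfsAlt (pvAdj course_map) init.1 init.2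

-- ===== PRECONDITION & SPEC =====
def Spec_expand_completed_with_prereqs (normalized_completed : List String) (course_map : List (String × List (String × String))) (out : List String) : Prop := out = expand_completed_with_prereqs_alt normalized_completed course_map
instance (normalized_completed : List String) (course_map : List (String × List (String × String))) (out : List String) : Decidable (Spec_expand_completed_with_prereqs normalized_completed course_map out) := by unfold Spec_expand_completed_with_prereqs; infer_instance

-- ===== CLAIM (what is proved, stated in full; the proofs are below) =====
def Claim_equal_expand_completed_with_prereqs : Prop := ∀ (normalized_completed : List String) (course_map : List (String × List (String × String))), Dom_expand_completed_with_prereqs normalized_completed course_map → Spec_expand_completed_with_prereqs normalized_completed course_map (expand_completed_with_prereqs normalized_completed course_map)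

-- ===== LEMMAS AND PROOFS =====
-- the precomputed adjacency dict looks up to exactly the parse A does per visit
theorem pv_get?_pvAdj (cm : List (String × List (String × String))) (k : String) :
    (pvAdj cm).get? k
      = (PySem.Dict.get? (PySem.Dict.ofList cm) k).map
          (fun course => parse_prereq_string (PySem.Dict.getD (PySem.Dict.ofList course) "pre_requisites" "")) := by
  suffices H : ∀ (l : List (String × List (String × String)))
      (d : PySem.Dict String (List (String × String))) (d' : PySem.Dict String (List String)),
      (∀ k, d'.get? k = (d.get? k).map
        (fun course => parse_prereq_string (PySem.Dict.getD (PySem.Dict.ofList course) "pre_requisites" ""))) →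
      ∀ k, (l.foldl (fun d kv =>
          d.insert kv.1 (parse_prereq_string (PySem.Dict.getD (PySem.Dict.ofList kv.2) "pre_requisites" ""))) d').get? k
        = ((l.foldl (fun d kv => d.insert kv.1 kv.2) d).get? k).map
          (fun course => parse_prereq_string (PySem.Dict.getD (PySem.Dict.ofList course) "pre_requisites" "")) by
    exact H cm PySem.Dict.empty PySem.Dict.empty (by intro k; simp [PySem.Dict.get?_empty]) k
  intro l
  induction l with
  | nil => intro d d' hinv k; exact hinv k
  | cons kv l ih =>
      intro d d' hinv k
      simp only [List.foldl_cons]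
      refine ih (d.insert kv.1 kv.2) _ ?_ k
      intro k'
      rw [PySem.Dict.get?_insert, PySem.Dict.get?_insert]
      by_cases hk : k' = kv.1 <;> simp [hk, hinv k']

theorem pv_getD_pvAdj (cm : List (String × List (String × String))) (code : String) :
    PySem.Dict.getD (pvAdj cm) code [] = pvPrereqsOf cm code := by
  rw [PySem.Dict.getD_eq_get?_getD, pv_get?_pvAdj]
  unfold pvPrereqsOf pvCourseOf
  rcases hg : PySem.Dict.get? (PySem.Dict.ofList cm) code with _ | course
  · simp
  · simp only [Option.map_some, Option.getD_some]
    by_cases hc : course = []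
    · subst hc
      rw [if_pos rfl]
      decide
    · rw [if_neg (by simpa using hc)]

theorem pv_nsB_char (cm : List (String × List (String × String))) (code : String) :
    (if PySem.Dict.contains COURSE_EQUIVALENCES code = true
      then PySem.Dict.getD (pvAdj cm) code [] ++ [PySem.Dict.getD COURSE_EQUIVALENCES code ""]
      else PySem.Dict.getD (pvAdj cm) code []) = pvNbrs cm code := by
  unfold pvNbrs
  by_cases hc : PySem.Dict.contains COURSE_EQUIVALENCES code = true
  · rw [if_pos hc]
    have hsome : ∃ e, PySem.Dict.get? COURSE_EQUIVALENCES code = some e := by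
      rw [PySem.Dict.contains_eq_isSome_get?] at hc
      exact Option.isSome_iff_exists.1 hc
    rcases hsome with ⟨e, he⟩
    have hne : e ≠ "" := by
      have hmem : (code, e) ∈ [("MATH 3313", "IE 3301"), ("IE 3301", "MATH 3313"),
          ("MATH 3330", "CSE 3380"), ("CSE 3380", "MATH 3330")] :=
        pv_mem_of_mem_items_ofList _ _ (PySem.Dict.mem_items_of_get?_eq_some _ he)
      simp only [List.mem_cons, List.not_mem_nil, or_false, Prod.mk.injEq] at hmem
      rcases hmem with ⟨-, h⟩ | ⟨-, h⟩ | ⟨-, h⟩ | ⟨-, h⟩ <;> rw [h] <;> decide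
    rw [pv_getD_pvAdj, PySem.Dict.getD_of_get?_eq_some _ _ he]
    unfold pvEquivOf
    rw [he]
    simp [hne]
  · rw [if_neg hc]
    have hnone : PySem.Dict.get? COURSE_EQUIVALENCES code = none := by
      rw [PySem.Dict.contains_eq_isSome_get?] at hc
      simpa using hc
    rw [pv_getD_pvAdj]
    unfold pvEquivOf
    rw [hnone]
    simp

theorem pv_pvMulti_eq_append (cm : List (String × List (String × String))) (q S : List String) :
    pvMulti cm S q = S ++ (pvMulti cm S q).drop S.length :=
  (List.prefix_iff_eq_append.1 (pv_prefix_pvMulti cm q S)).symm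

theorem pv_arg_mem_pvAddAll (x : String) (xs S : List String) (h : x ∈ xs) : x ∈ pvAddAll S xs := by
  induction xs generalizing S with
  | nil => simp at h
  | cons p xs ih =>
      simp only [pvAddAll, List.foldl_cons]
      rcases List.mem_cons.1 h with rfl | hx
      · by_cases hp : x ∈ S
        · rw [if_pos hp]; exact (pv_prefix_pvAddAll xs S).subset hp
        · rw [if_neg hp]
          exact (pv_prefix_pvAddAll xs (S ++ [x])).subset (by simp)
      · by_cases hp : p ∈ S
        · rw [if_pos hp]; exact ih S hx
        · rw [if_neg hp]; exact ih (S ++ [p]) hx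

theorem pv_pvAddAll_of_subset (xs S : List String) (h : ∀ x ∈ xs, x ∈ S) : pvAddAll S xs = S := by
  induction xs with
  | nil => simp [pvAddAll]
  | cons p xs ih =>
      simp only [pvAddAll, List.foldl_cons]
      rw [if_pos (h p (List.mem_cons_self))]
      exact ih (fun x hx => h x (List.mem_cons_of_mem _ hx))

theorem pv_multi_of_sat (cm : List (String × List (String × String))) (P : List String) :
    ∀ S, (∀ c ∈ P, ∀ x ∈ pvNbrs cm c, x ∈ S) → pvMulti cm S P = S := by
  induction P with
  | nil => intro S _; rfl
  | cons c P ih =>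
      intro S h
      simp only [pvMulti, List.foldl_cons]
      have hc : pvProcOne cm S c = S :=
        pv_pvAddAll_of_subset _ S (h c (List.mem_cons_self))
      rw [hc]
      exact ih S (fun c' hc' => h c' (List.mem_cons_of_mem _ hc'))

theorem pv_multi_sat_mem (cm : List (String × List (String × String))) (q S : List String)
    (c : String) (hc : c ∈ q) : ∀ x ∈ pvNbrs cm c, x ∈ pvMulti cm S q := by
  intro x hx
  rcases List.append_of_mem hc with ⟨s, t, rfl⟩
  have : pvMulti cm S (s ++ c :: t) = pvMulti cm (pvProcOne cm (pvMulti cm S s) c) t := by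
    simp [pvMulti, List.foldl_append]
  rw [this]
  exact (pv_prefix_pvMulti cm t _).subset (pv_arg_mem_pvAddAll x _ _ hx)

theorem pv_bfsAlt_step (cm : List (String × List (String × String))) (S : List String)
    (code : String) (rest : List String) :
    bfsAlt (pvAdj cm) S (code :: rest)
      = bfsAlt (pvAdj cm) (pvProcOne cm S code)
          (rest ++ (pvProcOne cm S code).drop S.length) := by
  rw [bfsAlt.eq_def]
  simp only [pv_nsB_char, pv_foldNew]
  rfl

theorem pv_bfs_level (cm : List (String × List (String × String))) (q : List String) :
    ∀ (S r : List String),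
      bfsAlt (pvAdj cm) S (q ++ r)
        = bfsAlt (pvAdj cm) (pvMulti cm S q) (r ++ (pvMulti cm S q).drop S.length) := by
  induction q with
  | nil =>
      intro S r
      simp [pvMulti, List.drop_length]
  | cons c q ih =>
      intro S r
      rw [show (c :: q) ++ r = c :: (q ++ r) from rfl, pv_bfsAlt_step]
      rw [List.append_assoc, ih (pvProcOne cm S c) (r ++ (pvProcOne cm S c).drop S.length)]
      rw [show pvMulti cm S (c :: q) = pvMulti cm (pvProcOne cm S c) q from rfl]
      have h1 : S <+: pvProcOne cm S c := pv_prefix_pvAddAll _ S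
      have h2 : pvProcOne cm S c <+: pvMulti cm (pvProcOne cm S c) q := pv_prefix_pvMulti cm q _
      rw [pv_drop_chain S (pvProcOne cm S c) (pvMulti cm (pvProcOne cm S c) q) h1 h2,
        List.append_assoc]

theorem pv_loop_eq_bfs (cm : List (String × List (String × String))) :
    ∀ (k : Nat) (S P q : List String), pvMeasureU (pvUList cm) S ≤ k → S = P ++ q →
      (∀ c ∈ P, ∀ x ∈ pvNbrs cm c, x ∈ S) → aLoop cm S = bfsAlt (pvAdj cm) S q := by
  intro k
  induction k using Nat.strong_induction_on with
  | _ k ih =>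
      intro S P q hk hS hsat
      have hmultiP : pvMulti cm S P = S := pv_multi_of_sat cm P S hsat
      have hmultiS : pvMulti cm S S = pvMulti cm S q := by
        rw [congrArg (pvMulti cm S) hS,
          show pvMulti cm S (P ++ q) = pvMulti cm (pvMulti cm S P) q from by
            simp [pvMulti, List.foldl_append], hmultiP]
      have hpass : passA cm S = (pvMulti cm S q, decide (pvMulti cm S q ≠ S)) := by
        rw [passA, pv_passA_char cm S S false, hmultiS, Bool.false_or]
      have hbfs : bfsAlt (pvAdj cm) S q
          = bfsAlt (pvAdj cm) (pvMulti cm S q) ((pvMulti cm S q).drop S.length) := by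
        have := pv_bfs_level cm q S []
        simpa using this
      set T := pvMulti cm S q with hT
      by_cases hne : T = S
      · rw [aLoop, hpass]
        simp only [hne, ne_eq, not_true_eq_false, decide_false]
        rw [hbfs, hne, List.drop_length, bfsAlt.eq_def]
        simp
      · have hlt : pvMeasureU (pvUList cm) T < pvMeasureU (pvUList cm) S :=
          pv_measure_lt (pvUList cm) S T (pv_prefix_pvMulti cm q S) hne
            (pv_mem_pvMulti_U cm q S) (pv_drop_pvMulti_not_mem cm q S)
        have hstep : aLoop cm S = aLoop cm T := by
          rw [aLoop, hpass]
          simp [hne]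
        rw [hstep, hbfs]
        refine ih (pvMeasureU (pvUList cm) T) (lt_of_lt_of_le hlt hk) T S (T.drop S.length) (le_refl _)
          (pv_pvMulti_eq_append cm q S) ?_
        intro c hc x hx
        rcases List.mem_append.1 (hS ▸ hc) with hcP | hcq
        · exact (pv_prefix_pvMulti cm q S).subset (hsat c hcP x hx)
        · exact pv_multi_sat_mem cm q S c hcq x hx

theorem pv_setOfList_eq_addAll (xs : List String) :
    PySem.Set.ofList xs = pvAddAll [] xs := by
  suffices H : ∀ S : List String, xs.foldl PySem.Set.add S = pvAddAll S xs from H []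
  induction xs with
  | nil => intro S; rfl
  | cons p xs ih =>
      intro S
      rw [List.foldl_cons, show PySem.Set.add S p = if p ∈ S then S else S ++ [p] from by
        simp [PySem.Set.add, PySem.Set.contains], ih]
      by_cases hp : p ∈ S <;> simp [pvAddAll, hp]

-- ===== VERDICT (by name: the statement is the Claim_ definition above) =====
theorem expand_completed_with_prereqs_spec : Claim_equal_expand_completed_with_prereqs := by
  intro ncm cm _
  unfold Spec_expand_completed_with_prereqs
  unfold expand_completed_with_prereqs expand_completed_with_prereqs_alt
  rw [pv_foldNew ncm [] []]
  simp only [List.nil_append]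
  rw [pv_setOfList_eq_addAll]
  exact pv_loop_eq_bfs cm (pvMeasureU (pvUList cm) (pvAddAll [] ncm)) (pvAddAll [] ncm) [] (pvAddAll [] ncm)
    (le_refl _) (by simp) (by simp)
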